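-- pv_equiv track=rewrite | github.com/Canbomm/UNB | 1 Semestre/Questionários/Questionário 9/Questão 05/AjudaOT.py | trabalhaVetor
-- ===== SOURCE A (Python) =====
-- def trabalhaVetor(lista,tamanho):
--     ocorrenciasPos = {}
--     index = 0
--     while index < tamanho:
--         num = lista[index]
--         if num in ocorrenciasPos:
--             ocorrenciasPos[num][0] += 1
--         else:
--             ocorrenciasPos[num] = [1,index]
--         index += 1
--     return ocorrenciasPos
-- ===== SOURCE B (Python) =====
-- def trabalhaVetor(lista, tamanho):
--     prefix = [lista[i] for i in range(tamanho)]
--     counts = {}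
--     for num in prefix:
--         counts[num] = counts.get(num, 0) + 1
--     firsts = {}
--     for i, num in enumerate(prefix):
--         if num not in firsts:
--             firsts[num] = i
--     return {num: [counts[num], firsts[num]] for num in firsts}
-- ===== Notes on version B (the rewrite author's own statement) =====
-- stated objective: alternative
-- what changed: Single while-loop maintaining a dict of mutable [count,index] cells is replaced by three independent passes: a counts dict, a firsts dict over enumerate, and a final dict comprehension combining them; same O(n) cost.
import Mathlib
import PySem

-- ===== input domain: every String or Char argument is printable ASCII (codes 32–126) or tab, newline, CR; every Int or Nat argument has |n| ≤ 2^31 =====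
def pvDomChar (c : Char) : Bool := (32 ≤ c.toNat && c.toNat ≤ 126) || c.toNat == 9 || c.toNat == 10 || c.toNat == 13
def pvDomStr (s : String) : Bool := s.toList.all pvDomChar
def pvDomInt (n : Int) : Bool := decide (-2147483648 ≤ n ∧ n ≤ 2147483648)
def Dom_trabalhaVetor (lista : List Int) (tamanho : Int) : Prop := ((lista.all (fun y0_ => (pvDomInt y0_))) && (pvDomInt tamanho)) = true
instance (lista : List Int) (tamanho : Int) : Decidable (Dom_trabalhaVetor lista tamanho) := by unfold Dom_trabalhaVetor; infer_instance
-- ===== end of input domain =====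

-- B replaces A's single while-loop over a dict of mutable [count,index] cells by three
-- independent passes (a counts dict, a firsts dict, a combining comprehension); same O(n) cost.

-- ===== PORT A =====
-- the while loop 'index = 0; while index < tamanho: … index += 1' is the index loop over range(tamanho);
-- lista[index] is in range exactly on Pre_; outside Pre_ Python raises IndexError (pyGetD's default is never read inside Pre_)
def trabalhaVetor (lista : List Int) (tamanho : Int) : List (Int × List Int) :=
  ((PySem.List.pyRange 0 tamanho 1).foldl
    (fun d index =>
      let num := PySem.List.pyGetD lista index 0
      if d.contains num then
        d.modify num [] (fun v => match v with | c :: r => (c + 1) :: r | [] => [])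
      else
        d.insert num [1, index])
    PySem.Dict.empty).items

-- ===== PORT B =====
def trabalhaVetor_alt (lista : List Int) (tamanho : Int) : List (Int × List Int) :=
  let pfx := (PySem.List.pyRange 0 tamanho 1).map (fun i => PySem.List.pyGetD lista i 0)
  let counts := pfx.foldl (fun d num => d.insert num (d.getD num 0 + 1)) PySem.Dict.empty
  let firsts := (PySem.List.enumerate pfx).foldl
    (fun d p => if d.contains p.2 then d else d.insert p.2 p.1) PySem.Dict.empty
  firsts.items.map (fun p => (p.1, [counts.getD p.1 0, p.2]))

-- ===== PRECONDITION & SPEC =====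
-- Pre_ excludes exactly the inputs where Python's lista[index] raises IndexError (tamanho beyond the list's length)
def Pre_trabalhaVetor (lista : List Int) (tamanho : Int) : Prop := tamanho ≤ (lista.length : Int)
instance (lista : List Int) (tamanho : Int) : Decidable (Pre_trabalhaVetor lista tamanho) := by unfold Pre_trabalhaVetor; infer_instance
def pvWitness_trabalhaVetor : List Int × Int := ([2, 5, 2, 7, 5, 2], 6)

def Spec_trabalhaVetor (lista : List Int) (tamanho : Int) (out : List (Int × List Int)) : Prop := out = trabalhaVetor_alt lista tamanho
instance (lista : List Int) (tamanho : Int) (out : List (Int × List Int)) : Decidable (Spec_trabalhaVetor lista tamanho out) := by unfold Spec_trabalhaVetor; infer_instance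

-- ===== CLAIM (what is proved, stated in full; the proofs are below) =====
def Claim_equal_trabalhaVetor : Prop := ∀ (lista : List Int) (tamanho : Int), Dom_trabalhaVetor lista tamanho → Pre_trabalhaVetor lista tamanho → Spec_trabalhaVetor lista tamanho (trabalhaVetor lista tamanho)

-- ===== LEMMAS AND PROOFS =====

-- A's loop step, on an (index, value) pair
def pvStepA (d : PySem.Dict Int (List Int)) (p : Int × Int) : PySem.Dict Int (List Int) :=
  if d.contains p.2 then
    d.modify p.2 [] (fun v => match v with | c :: r => (c + 1) :: r | [] => [])
  else
    d.insert p.2 [1, p.1]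

-- B's firsts step
def pvStepF (d : PySem.Dict Int Int) (p : Int × Int) : PySem.Dict Int Int :=
  if d.contains p.2 then d else d.insert p.2 p.1

def pvFirsts (l : List Int) (s : Int) : PySem.Dict Int Int :=
  (PySem.List.enumerate l s).foldl pvStepF PySem.Dict.empty

lemma pvEnumerate_append_singleton (l : List Int) (x : Int) (s : Int) :
    PySem.List.enumerate (l ++ [x]) s
      = PySem.List.enumerate l s ++ [(s + l.length, x)] := by
  induction l generalizing s with
  | nil => simp [PySem.List.enumerate_nil, PySem.List.enumerate_cons]
  | cons a l ih =>
      simp [PySem.List.enumerate_cons, ih (s + 1)]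
      ring_nf

lemma pvFirsts_append (l : List Int) (x : Int) (s : Int) :
    pvFirsts (l ++ [x]) s
      = if (pvFirsts l s).contains x then pvFirsts l s
        else (pvFirsts l s).insert x (s + l.length) := by
  simp [pvFirsts, pvEnumerate_append_singleton, List.foldl_append, pvStepF]

lemma pvContains_firsts (l : List Int) (s : Int) (k : Int) :
    (pvFirsts l s).contains k = decide (k ∈ l) := by
  induction l using List.reverseRecOn generalizing k with
  | nil => simp [pvFirsts, PySem.List.enumerate_nil, PySem.Dict.contains_empty]
  | append_singleton l x ih =>
      rw [pvFirsts_append]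
      by_cases h : (pvFirsts l s).contains x = true
      · have hx : x ∈ l := by have := ih x; rw [h] at this; simpa using this.symm
        rw [if_pos h, ih k]
        by_cases hk : k = x <;> simp [hk, hx]
      · rw [if_neg h, PySem.Dict.contains_insert, ih k]
        by_cases hk : k = x <;> simp [hk]

lemma pvNodup_firsts (l : List Int) (s : Int) : (pvFirsts l s).keys.Nodup := by
  induction l using List.reverseRecOn with
  | nil => simp [pvFirsts, PySem.List.enumerate_nil, PySem.Dict.keys_empty]
  | append_singleton l x ih =>
      rw [pvFirsts_append]
      by_cases h : (pvFirsts l s).contains x = true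
      · simp [h, ih]
      · rw [if_neg h, PySem.Dict.keys_insert_of_not_contains _ _ (by simpa using h)]
        have hx : x ∉ (pvFirsts l s).keys := fun hmem =>
          absurd ((PySem.Dict.contains_iff_mem_keys _ _).mpr hmem) (by simpa using h)
        simp [List.nodup_append, ih]
        intro a ha he
        exact hx (he ▸ ha)

-- A's dict items equal the firsts items with each stored index i paired with the count
lemma pvMain (l : List Int) (s : Int) :
    ((PySem.List.enumerate l s).foldl pvStepA PySem.Dict.empty).items
      = (pvFirsts l s).items.map (fun p => (p.1, [(l.count p.1 : Int), p.2])) := by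
  induction l using List.reverseRecOn with
  | nil => rfl
  | append_singleton l x ih =>
      rw [pvEnumerate_append_singleton, List.foldl_append, pvFirsts_append]
      simp only [List.foldl_cons, List.foldl_nil]
      set A := (PySem.List.enumerate l s).foldl pvStepA PySem.Dict.empty with hA
      set F := pvFirsts l s with hF
      have hkeys : A.keys = F.keys := by
        simp only [PySem.Dict.keys, ih, List.map_map]; rfl
      have hnodF : F.keys.Nodup := pvNodup_firsts l s
      have hnodA : A.keys.Nodup := hkeys ▸ hnodF
      have hcont : A.contains x = F.contains x := by
        rw [PySem.Dict.contains_eq_decide_mem_keys, PySem.Dict.contains_eq_decide_mem_keys, hkeys]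
      by_cases h : F.contains x = true
      · -- x already seen: A modifies the head of its cell, F (and the key set) unchanged
        obtain ⟨p, hpF, hp1⟩ : ∃ p ∈ F.items, p.1 = x := by
          have hxk : x ∈ F.keys := (PySem.Dict.contains_iff_mem_keys _ _).mp h
          simp only [PySem.Dict.keys, List.mem_map] at hxk
          obtain ⟨p, hp, hpx⟩ := hxk; exact ⟨p, hp, hpx⟩
        have hmemA : (x, [(l.count x : Int), p.2]) ∈ A.items := by
          rw [ih]; exact List.mem_map.mpr ⟨p, hpF, by rw [hp1]⟩
        have hgetA : A.getD x [] = [(l.count x : Int), p.2] :=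
          PySem.Dict.getD_of_mem_items A hmemA hnodA []
        have hcA : A.contains x = true := by rw [hcont]; exact h
        have hstep : pvStepA A (s + (l.length : Int), x)
            = A.insert x (((l.count x : Int) + 1) :: [p.2]) := by
          simp [pvStepA, hcA, PySem.Dict.modify, hgetA]
        rw [hstep, if_pos h]
        rw [PySem.Dict.items_insert_of_contains A _ hcA, ih, List.map_map]
        refine List.map_congr_left ?_
        intro q hq
        by_cases hqx : q.1 = x
        · have hq2 : q.2 = p.2 := by
            have h1 := PySem.Dict.getD_of_mem_items F (hqx ▸ hq : (x, q.2) ∈ F.items) hnodF 0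
            have h2 := PySem.Dict.getD_of_mem_items F (hp1 ▸ hpF : (x, p.2) ∈ F.items) hnodF 0
            rw [h1] at h2; exact h2
          have hc1 : (l ++ [x]).count x = l.count x + 1 := by
            rw [List.count_append]; simp
          simp only [Function.comp, hqx, beq_self_eq_true, if_true, hc1, hq2]
          push_cast; ring_nf
        · have : (l ++ [x]).count q.1 = l.count q.1 := by
            rw [List.count_append]; simp [List.count_singleton]
            exact fun he => hqx he.symm
          simp [Function.comp, hqx, this]
      · -- x is new: both dicts append an entry for x
        have hxl : x ∉ l := by
          have hc := pvContains_firsts l s x; rw [← hF] at hc; rw [hc] at h; simpa using h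
        have hcA : A.contains x = false := by rw [hcont]; simpa using h
        have hstep : pvStepA A (s + (l.length : Int), x)
            = A.insert x [1, s + (l.length : Int)] := by
          simp [pvStepA, hcA]
        rw [hstep, if_neg h, PySem.Dict.items_insert_of_not_contains A _ hcA,
            PySem.Dict.items_insert_of_not_contains F _ (by simpa using h),
            List.map_append, ih]
        congr 1
        · refine List.map_congr_left ?_
          intro q hq
          have hqx : q.1 ≠ x := by
            intro hqe
            exact hxl (by
              have := pvContains_firsts l s q.1
              rw [← hF] at this
              have hqk : q.1 ∈ F.keys := by
                simp only [PySem.Dict.keys, List.mem_map]; exact ⟨q, hq, rfl⟩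
              rw [PySem.Dict.contains_eq_decide_mem_keys] at this
              simp [hqk] at this
              exact hqe ▸ this)
          have : (l ++ [x]).count q.1 = l.count q.1 := by
            rw [List.count_append]; simp [List.count_singleton]
            exact fun he => hqx he.symm
          simp [this]
        · simp [List.count_eq_zero.mpr hxl]

-- A's index fold over range(tamanho) is the pair fold over enumerate(prefix)
lemma pvFoldA (lista : List Int) (t : Int) :
    ∀ (n : Nat) (a : Int) (d : PySem.Dict Int (List Int)), (t - a).toNat = n →
    (PySem.List.pyRange a t 1).foldl
      (fun d index =>
        let num := PySem.List.pyGetD lista index 0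
        if d.contains num then
          d.modify num [] (fun v => match v with | c :: r => (c + 1) :: r | [] => [])
        else
          d.insert num [1, index]) d
      = (PySem.List.enumerate ((PySem.List.pyRange a t 1).map
            (fun i => PySem.List.pyGetD lista i 0)) a).foldl pvStepA d := by
  intro n
  induction n with
  | zero =>
      intro a d h
      have hle : t ≤ a := by omega
      simp [PySem.List.pyRange_one_eq_nil hle, PySem.List.enumerate_nil]
  | succ n ih =>
      intro a d h
      have hlt : a < t := by omega
      rw [PySem.List.pyRange_one_cons hlt]
      simp only [List.foldl_cons, List.map_cons, PySem.List.enumerate_cons]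
      exact ih (a + 1) _ (by omega)

-- ===== VERDICT (by name: the statement is the Claim_ definition above) =====
theorem trabalhaVetor_spec : Claim_equal_trabalhaVetor := by
  intro lista tamanho _ _
  unfold Spec_trabalhaVetor
  show trabalhaVetor lista tamanho = trabalhaVetor_alt lista tamanho
  unfold trabalhaVetor trabalhaVetor_alt
  rw [pvFoldA lista tamanho (tamanho - 0).toNat 0 PySem.Dict.empty rfl]
  rw [pvMain ((PySem.List.pyRange 0 tamanho 1).map (fun i => PySem.List.pyGetD lista i 0)) 0]
  simp only [PySem.Dict.getD_foldl_insert_add_one, PySem.Dict.getD_empty, zero_add]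
  rfl
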